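-- pv_equiv track=rewrite | github.com/jdrumgoole/pyimport | pyimport/fieldfile.py | clean_field_names
-- ===== SOURCE A (Python) =====
-- def clean_field_names(fn:list[str]) ->list[str]:
--     new_fn = []
--     id_field = None
--     for i, k in enumerate(fn, 1):
--         if k == "_id":
--             if id_field is None:
--                 id_field = k
--                 new_fn.append(k)
--             else:
--                 raise ValueError(
--                     f"Duplicate _id field:{k} appears more than once as _id see field:{id_field} and {i}")
--         elif k == "":
--             new_fn.append( f"Blank-{i}")
--         else:
--             nk = k.replace('$', '_')  # not valid keys for mongodb
--             nk = nk.replace('.', '_')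
--             new_fn.append(nk)
--
--     return new_fn
-- ===== SOURCE B (Python) =====
-- def clean_field_names(fn: list[str]) -> list[str]:
--     ids = [i for i, k in enumerate(fn, 1) if k == "_id"]
--     if len(ids) > 1:
--         raise ValueError(
--             f"Duplicate _id field:_id appears more than once as _id see field:_id and {ids[1]}")
--     return ["_id" if k == "_id"
--             else f"Blank-{i}" if k == ""
--             else k.replace('$', '_').replace('.', '_')
--             for i, k in enumerate(fn, 1)]
-- ===== Notes on version B (the rewrite author's own statement) =====
-- stated objective: alternative
-- what changed: Replaces A's single interleaved loop (appending while tracking an id_field flag) with a two-pass decomposition: a validation pass collecting the 1-based indices of '_id' (raising on duplicates with the same message), then a stateless list comprehension mapping each field.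
import Mathlib
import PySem

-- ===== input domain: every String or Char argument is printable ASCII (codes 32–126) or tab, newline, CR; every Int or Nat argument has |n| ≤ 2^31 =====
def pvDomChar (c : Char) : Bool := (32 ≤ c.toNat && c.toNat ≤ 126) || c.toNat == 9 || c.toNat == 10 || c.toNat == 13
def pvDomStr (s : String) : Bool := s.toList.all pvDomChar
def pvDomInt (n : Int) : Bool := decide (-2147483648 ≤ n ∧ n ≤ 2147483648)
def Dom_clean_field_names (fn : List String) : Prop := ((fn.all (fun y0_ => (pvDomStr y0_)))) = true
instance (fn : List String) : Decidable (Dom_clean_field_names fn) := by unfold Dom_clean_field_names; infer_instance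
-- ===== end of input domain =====

-- B replaces A's single interleaved loop (append + id_field flag) with a validation pass
-- over the '_id' indices followed by a stateless map; same values, same exception behaviour.


-- ===== PORT A =====
-- A's loop: iterate over enumerate(fn, 1) carrying (new_fn, id_field); 'none' = the raise.
def cfnLoopA : List (Int × String) → Option String → Option (List String)
  | [], _ => some []
  | (i, k) :: rest, idField =>
    if k = "_id" then
      match idField with
      | none => (cfnLoopA rest (some k)).map (fun t => k :: t)
      | some _ => none          -- raise ValueError (excluded by Pre_)
    else if k = "" then
      (cfnLoopA rest idField).map (fun t => ("Blank-" ++ PySem.Int.toStr i) :: t)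
    else
      (cfnLoopA rest idField).map (fun t =>
        (PySem.Str.replace (PySem.Str.replace k "$" "_") "." "_") :: t)

def clean_field_names (fn : List String) : List String :=
  (cfnLoopA (PySem.List.enumerate fn 1) none).getD []

-- ===== PORT B =====
def clean_field_names_alt (fn : List String) : List String :=
  let ids := ((PySem.List.enumerate fn 1).filter (fun p => p.2 == "_id")).map (·.1)
  if ids.length > 1 then []     -- raise ValueError (excluded by Pre_)
  else (PySem.List.enumerate fn 1).map (fun p =>
    if p.2 = "_id" then "_id"
    else if p.2 = "" then "Blank-" ++ PySem.Int.toStr p.1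
    else PySem.Str.replace (PySem.Str.replace p.2 "$" "_") "." "_")

-- ===== PRECONDITION & SPEC =====
-- Pre_ excludes exactly the inputs where '_id' occurs more than once: there A (and B) raise ValueError.
def Pre_clean_field_names (fn : List String) : Prop := fn.countP (· == "_id") ≤ 1
instance (fn : List String) : Decidable (Pre_clean_field_names fn) := by unfold Pre_clean_field_names; infer_instance
def pvWitness_clean_field_names : List String := ["", "a.b", "$x", "_id", "x$y.z"]

def Spec_clean_field_names (fn : List String) (out : List String) : Prop := out = clean_field_names_alt fn
instance (fn : List String) (out : List String) : Decidable (Spec_clean_field_names fn out) := by unfold Spec_clean_field_names; infer_instance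

-- ===== CLAIM (what is proved, stated in full; the proofs are below) =====
def Claim_equal_clean_field_names : Prop := ∀ (fn : List String), Dom_clean_field_names fn → Pre_clean_field_names fn → Spec_clean_field_names fn (clean_field_names fn)

-- ===== LEMMAS AND PROOFS =====

-- the per-field transform used by B's map
def cfnTr (p : Int × String) : String :=
  if p.2 = "_id" then "_id"
  else if p.2 = "" then "Blank-" ++ PySem.Int.toStr p.1
  else PySem.Str.replace (PySem.Str.replace p.2 "$" "_") "." "_"

lemma cfnFilterLen (fn : List String) (s : Int) :
    (((PySem.List.enumerate fn s).filter (fun p => p.2 == "_id")).map (·.1)).length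
      = fn.countP (· == "_id") := by
  induction fn generalizing s with
  | nil => simp [PySem.List.enumerate_nil]
  | cons k rest ih =>
    rw [PySem.List.enumerate_cons]
    by_cases h : k = "_id" <;> simp [h, ih]

lemma cfnLoopA_eq (fn : List String) (s : Int) (idField : Option String)
    (h : fn.countP (· == "_id") + (if idField.isSome then 1 else 0) ≤ 1) :
    cfnLoopA (PySem.List.enumerate fn s) idField
      = some ((PySem.List.enumerate fn s).map cfnTr) := by
  induction fn generalizing s idField with
  | nil => simp [PySem.List.enumerate_nil, cfnLoopA]
  | cons k rest ih =>
    rw [PySem.List.enumerate_cons]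
    by_cases hk : k = "_id"
    · subst hk
      have hc : rest.countP (· == "_id") ≤ 0 := by
        simp at h; omega
      match idField with
      | some x => exfalso; simp at h
      | none =>
        simp only [cfnLoopA]
        rw [ih (s + 1) (some "_id") (by simp only [Option.isSome_some, if_true]; omega)]
        simp [cfnTr]
    · by_cases he : k = ""
      · subst he
        simp only [cfnLoopA, if_neg hk]
        rw [ih (s + 1) idField (by simp at h; omega)]
        simp [cfnTr]
      · simp only [cfnLoopA, if_neg hk, if_neg he]
        rw [ih (s + 1) idField (by simp [hk] at h; omega)]
        simp [cfnTr, hk, he]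

-- ===== VERDICT (by name: the statement is the Claim_ definition above) =====
theorem clean_field_names_spec : Claim_equal_clean_field_names := by
  intro fn _ hpre
  unfold Pre_clean_field_names at hpre
  unfold Spec_clean_field_names clean_field_names clean_field_names_alt
  rw [cfnLoopA_eq fn 1 none (by simpa using hpre)]
  rw [if_neg (by rw [cfnFilterLen]; omega)]
  rfl
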